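-- pv_equiv track=rewrite | github.com/mylestunglee/adventofcode2023 | day10.py | intersect_loop
-- ===== SOURCE A (Python) =====
-- def intersect_loop(loop_chars):
--     result = False
--     start = None
--     for char in loop_chars:
--         if char == 'F':
--             assert start is None
--             start = 'F'
--         elif char == 'L':
--             assert start is None
--             start = 'L'
--         elif char == '7':
--             assert start == 'F' or start == 'L'
--             if start == 'L':
--                 result = not result
--             start = None
--         elif char == 'J':
--             assert start == 'F' or start == 'L'
--             if start == 'F':
--                 result = not result
--             start = None
--         elif char == '|':
--             assert start is None
--             result = not result
--
--     return result
-- ===== SOURCE B (Python) =====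
-- def intersect_loop(loop_chars):
--     return sum(1 for char in loop_chars if char in {'|', 'L', 'J'}) % 2 == 1
-- ===== Notes on version B (the rewrite author's own statement) =====
-- stated objective: simpler
-- what changed: Replaces A's stateful corner-matching state machine (pending-opener tracking with conditional toggles) by a stateless one-liner: the crossing parity equals the parity of the number of characters in {'|','L','J'}.
-- outside the precondition, e.g. on intersect_loop(['L']): A returns False, B returns True
import Mathlib
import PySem

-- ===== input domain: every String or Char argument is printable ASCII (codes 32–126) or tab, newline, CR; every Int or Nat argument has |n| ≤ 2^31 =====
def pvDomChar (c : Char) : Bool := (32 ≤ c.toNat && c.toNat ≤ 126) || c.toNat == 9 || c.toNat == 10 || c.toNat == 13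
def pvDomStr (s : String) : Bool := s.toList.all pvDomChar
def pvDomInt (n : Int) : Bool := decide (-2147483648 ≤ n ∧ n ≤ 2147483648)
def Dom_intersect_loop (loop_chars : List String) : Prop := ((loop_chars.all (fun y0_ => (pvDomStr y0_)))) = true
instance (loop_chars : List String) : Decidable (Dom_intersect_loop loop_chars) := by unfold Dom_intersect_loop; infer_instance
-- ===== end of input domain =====

-- B replaces A's stateful pending-opener state machine by a stateless parity count of {'|','L','J'} (simpler, same cost).


-- ===== PORT A =====
-- A's loop body; the asserts are modeled as no-ops (Pre_intersect_loop excludes every input on which one fires, i.e. on which Python A raises AssertionError).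
def pvStep (st : Bool × Option String) (char : String) : Bool × Option String :=
  if char = "F" then (st.1, some "F")
  else if char = "L" then (st.1, some "L")
  else if char = "7" then ((if st.2 = some "L" then !st.1 else st.1), none)
  else if char = "J" then ((if st.2 = some "F" then !st.1 else st.1), none)
  else if char = "|" then (!st.1, st.2)
  else st

def intersect_loop (loop_chars : List String) : Bool :=
  (loop_chars.foldl pvStep (false, none)).1

-- ===== PORT B =====
def pvCount (char : String) : Bool := char = "|" || char = "L" || char = "J"

def intersect_loop_alt (loop_chars : List String) : Bool :=
  decide (loop_chars.countP pvCount % 2 = 1)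

-- ===== PRECONDITION & SPEC =====
-- helpers for Pre_: the five characters A's state machine reacts to, openers, closers,
-- and the adjacent-pair condition "an opener is followed by exactly a closer"
def pvRel (c : String) : Bool := c = "F" || c = "L" || c = "7" || c = "J" || c = "|"
def pvOp (c : String) : Bool := c = "F" || c = "L"
def pvCl (c : String) : Bool := c = "7" || c = "J"

def pvChain : List String → Bool
  | [] => true
  | [_] => true
  | a :: b :: rest => (pvOp a == pvCl b) && pvChain (b :: rest)

-- Pre_ excludes (a) inputs on which an assert in A fires, i.e. A raises AssertionError (a closer '7'/'J' whose
-- immediately preceding relevant character is not an opener, or an opener 'F'/'L' followed by a relevant character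
-- that is not a closer), and (b) half-open inputs whose relevant-character sequence ends in an unclosed 'L':
-- such input is not a scanline of a closed loop and neither value is specified there — A's value (which ignores
-- the dangling opener) and B's value (which counts it as a crossing) are both defensible.
def Pre_intersect_loop (loop_chars : List String) : Prop :=
  pvChain (loop_chars.filter pvRel) = true ∧
  (loop_chars.filter pvRel).head?.all (fun h => !pvCl h) = true ∧
  (loop_chars.filter pvRel).getLast?.all (fun t => t != "L") = true

instance (loop_chars : List String) : Decidable (Pre_intersect_loop loop_chars) := by
  unfold Pre_intersect_loop; infer_instance

def pvWitness_intersect_loop : List String := ["F", "J", "x", "|", "L", "7"]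

def Spec_intersect_loop (loop_chars : List String) (out : Bool) : Prop := out = intersect_loop_alt loop_chars
instance (loop_chars : List String) (out : Bool) : Decidable (Spec_intersect_loop loop_chars out) := by unfold Spec_intersect_loop; infer_instance

-- ===== CLAIM (what is proved, stated in full; the proofs are below) =====
def Claim_equal_intersect_loop : Prop := ∀ (loop_chars : List String), Dom_intersect_loop loop_chars → Pre_intersect_loop loop_chars → Spec_intersect_loop loop_chars (intersect_loop loop_chars)

-- ===== LEMMAS AND PROOFS =====

lemma pvStep_irrel (st : Bool × Option String) (c : String) (h : pvRel c = false) :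
    pvStep st c = st := by
  simp only [pvRel, Bool.or_eq_false_iff, decide_eq_false_iff_not] at h
  simp [pvStep, h.1.1.1.1, h.1.1.1.2, h.1.1.2, h.1.2, h.2]

lemma pvFold_filter (l : List String) (st : Bool × Option String) :
    List.foldl pvStep st (l.filter pvRel) = List.foldl pvStep st l := by
  induction l generalizing st with
  | nil => rfl
  | cons c rest ih =>
    by_cases h : pvRel c = true
    · simp [h, ih]
    · simp only [Bool.not_eq_true] at h
      simp [h, ih, pvStep_irrel _ _ h]

lemma pvCount_rel (c : String) (h : pvCount c = true) : pvRel c = true := by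
  simp only [pvCount, Bool.or_eq_true, decide_eq_true_eq] at h
  rcases h with (h | h) | h <;> simp [pvRel, h]

lemma pvCount_filter (l : List String) :
    (l.filter pvRel).countP pvCount = l.countP pvCount := by
  induction l with
  | nil => rfl
  | cons c rest ih =>
    by_cases hr : pvRel c = true
    · simp [hr, List.countP_cons, ih]
    · have hc : pvCount c = false := by
        cases h : pvCount c
        · rfl
        · exact absurd (pvCount_rel c h) (by simpa using hr)
      simp only [Bool.not_eq_true] at hr
      simp [hr, hc, ih]

lemma pvParity_succ (k : Nat) : decide ((k + 1) % 2 = 1) = !decide (k % 2 = 1) := by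
  cases h : decide (k % 2 = 1) <;> simp at h ⊢ <;> omega

lemma pvChain_tail (a : String) (rest : List String) (h : pvChain (a :: rest) = true) :
    pvChain rest = true := by
  match rest with
  | [] => rfl
  | b :: r2 => exact (Bool.and_eq_true_iff.mp h).2

lemma pvChain_pair (a b : String) (rest : List String) (h : pvChain (a :: b :: rest) = true) :
    pvOp a = pvCl b :=
  beq_iff_eq.mp (Bool.and_eq_true_iff.mp h).1

-- after a non-opener, the next relevant character cannot be a closer
lemma pvHead_after (a : String) (rest : List String) (ha : pvOp a = false)
    (h : pvChain (a :: rest) = true) :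
    rest.head?.all (fun x => !pvCl x) = true := by
  match rest with
  | [] => rfl
  | e :: r2 =>
    have := pvChain_pair a e r2 h
    simp [List.head?, ← this, ha]

-- the main invariant: on a well-formed relevant-character sequence, A's fold from (r, none) ends with
-- r xor (parity of the {'|','L','J'} count)
lemma pvMain : ∀ (n : Nat) (s : List String), s.length ≤ n →
    (∀ c ∈ s, pvRel c = true) →
    pvChain s = true →
    s.head?.all (fun h => !pvCl h) = true →
    s.getLast?.all (fun t => t != "L") = true →
    ∀ r : Bool, (List.foldl pvStep (r, none) s).1 = (r ^^ decide (s.countP pvCount % 2 = 1)) := by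
  intro n
  induction n with
  | zero =>
    intro s hlen _ _ _ _ r
    have : s = [] := List.eq_nil_of_length_eq_zero (Nat.le_zero.mp hlen)
    subst this; simp
  | succ n ih =>
    intro s hlen hrel hchain hhead hlast r
    match s with
    | [] => simp
    | c :: rest =>
      have hc : pvRel c = true := hrel c (List.mem_cons_self ..)
      simp only [pvRel, Bool.or_eq_true, decide_eq_true_eq] at hc
      rcases hc with (((hc | hc) | hc) | hc) | hc
      · -- c = "F"
        subst hc
        match rest with
        | [] => simp [pvStep, pvCount]
        | d :: rest' =>
          have hd : pvCl d = true := by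
            have := pvChain_pair "F" d rest' hchain
            simpa [pvOp] using this.symm
          simp only [pvCl, Bool.or_eq_true, decide_eq_true_eq] at hd
          have hch2 : pvChain (d :: rest') = true := pvChain_tail _ _ hchain
          have hch' : pvChain rest' = true := pvChain_tail _ _ hch2
          have hdop : pvOp d = false := by rcases hd with hd | hd <;> subst hd <;> rfl
          have hh' : rest'.head?.all (fun x => !pvCl x) = true := pvHead_after d rest' hdop hch2
          have hl' : rest'.getLast?.all (fun t => t != "L") = true := by
            match rest' with
            | [] => rfl
            | e :: r2 => simpa [List.getLast?_cons_cons] using hlast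
          have hr' : ∀ x ∈ rest', pvRel x = true := fun x hx =>
            hrel x (List.mem_cons_of_mem _ (List.mem_cons_of_mem _ hx))
          have hlen' : rest'.length ≤ n := by
            simp only [List.length_cons] at hlen; omega
          rcases hd with hd | hd <;> subst hd
          · -- "F" then "7": no toggle, no count
            have := ih rest' hlen' hr' hch' hh' hl' r
            simp [List.foldl_cons, pvStep, pvCount, this]
          · -- "F" then "J": toggle, count 1
            have := ih rest' hlen' hr' hch' hh' hl' (!r)
            simp [List.foldl_cons, pvStep, pvCount, this, pvParity_succ]
      · -- c = "L"
        subst hc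
        match rest with
        | [] => simp [List.getLast?] at hlast
        | d :: rest' =>
          have hd : pvCl d = true := by
            have := pvChain_pair "L" d rest' hchain
            simpa [pvOp] using this.symm
          simp only [pvCl, Bool.or_eq_true, decide_eq_true_eq] at hd
          have hch2 : pvChain (d :: rest') = true := pvChain_tail _ _ hchain
          have hch' : pvChain rest' = true := pvChain_tail _ _ hch2
          have hdop : pvOp d = false := by rcases hd with hd | hd <;> subst hd <;> rfl
          have hh' : rest'.head?.all (fun x => !pvCl x) = true := pvHead_after d rest' hdop hch2
          have hl' : rest'.getLast?.all (fun t => t != "L") = true := by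
            match rest' with
            | [] => rfl
            | e :: r2 => simpa [List.getLast?_cons_cons] using hlast
          have hr' : ∀ x ∈ rest', pvRel x = true := fun x hx =>
            hrel x (List.mem_cons_of_mem _ (List.mem_cons_of_mem _ hx))
          have hlen' : rest'.length ≤ n := by
            simp only [List.length_cons] at hlen; omega
          rcases hd with hd | hd <;> subst hd
          · -- "L" then "7": toggle, count 1 (the "L")
            have := ih rest' hlen' hr' hch' hh' hl' (!r)
            simp [List.foldl_cons, pvStep, pvCount, this, pvParity_succ]
          · -- "L" then "J": no toggle, count 2
            have := ih rest' hlen' hr' hch' hh' hl' r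
            simp [List.foldl_cons, pvStep, pvCount, this, pvParity_succ]
      · -- c = "7": excluded by the head condition
        subst hc; simp [List.head?, pvCl] at hhead
      · -- c = "J": excluded by the head condition
        subst hc; simp [List.head?, pvCl] at hhead
      · -- c = "|": toggle, count 1
        subst hc
        have hh' : rest.head?.all (fun x => !pvCl x) = true := pvHead_after "|" rest rfl hchain
        have hl' : rest.getLast?.all (fun t => t != "L") = true := by
          match rest with
          | [] => rfl
          | e :: r2 => simpa [List.getLast?_cons_cons] using hlast
        have hlen' : rest.length ≤ n := by
          simp only [List.length_cons] at hlen; omega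
        have := ih rest hlen' (fun x hx => hrel x (List.mem_cons_of_mem _ hx))
          (pvChain_tail _ _ hchain) hh' hl' (!r)
        simp [List.foldl_cons, pvStep, pvCount, this, pvParity_succ]

-- ===== VERDICT (by name: the statement is the Claim_ definition above) =====
theorem intersect_loop_spec : Claim_equal_intersect_loop := by
  intro l _ hpre
  obtain ⟨hchain, hhead, hlast⟩ := hpre
  unfold Spec_intersect_loop intersect_loop intersect_loop_alt
  rw [← pvFold_filter, ← pvCount_filter]
  have hrel : ∀ c ∈ l.filter pvRel, pvRel c = true := fun c hc => (List.mem_filter.mp hc).2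
  have := pvMain (l.filter pvRel).length (l.filter pvRel) le_rfl hrel hchain hhead hlast false
  simpa using this
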